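-- pv_equiv track=rewrite | github.com/youngjinss/Korean-Bias-SAE | src/visualization/feature_selection.py | get_unique_features
-- ===== SOURCE A (Python) =====
-- from typing import Dict, List, Tuple, Optional
--
-- def get_unique_features(
--     demographic2features: Dict[str, List[int]]
-- ) -> Dict[str, List[int]]:
--     """
--     Find features unique to each demographic.
--
--     Args:
--         demographic2features: Map of demographics to feature lists
--
--     Returns:
--         Dictionary mapping demographics to their unique features
--     """
--     # Collect all features from other demographics
--     unique_features = {}
--
--     for target_demo, target_features in demographic2features.items():
--         target_set = set(target_features)
--
--         # Collect features from all other demographics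
--         other_features = set()
--         for demo, features in demographic2features.items():
--             if demo != target_demo:
--                 other_features.update(features)
--
--         # Find unique features
--         unique = target_set - other_features
--         unique_features[target_demo] = sorted(list(unique))
--
--     return unique_features
-- ===== SOURCE B (Python) =====
-- def get_unique_features(demographic2features):
--     """
--     Find features unique to each demographic.
--
--     One pass counts, for every feature, in how many demographics it occurs;
--     a feature is unique to a demographic iff its count is 1.
--     """
--     count = {}
--     for features in demographic2features.values():
--         for f in set(features):
--             count[f] = count.get(f, 0) + 1
--     return {
--         demo: sorted(f for f in set(features) if count[f] == 1)
--         for demo, features in demographic2features.items()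
--     }
-- ===== Notes on version B (the rewrite author's own statement) =====
-- stated objective: faster
-- what changed: Instead of recomputing, for every demographic, the union of all other demographics' features (a nested scan over the whole dict), B counts in one pass how many demographics contain each feature and then selects, per demographic, the features with count 1.
import Mathlib
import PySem

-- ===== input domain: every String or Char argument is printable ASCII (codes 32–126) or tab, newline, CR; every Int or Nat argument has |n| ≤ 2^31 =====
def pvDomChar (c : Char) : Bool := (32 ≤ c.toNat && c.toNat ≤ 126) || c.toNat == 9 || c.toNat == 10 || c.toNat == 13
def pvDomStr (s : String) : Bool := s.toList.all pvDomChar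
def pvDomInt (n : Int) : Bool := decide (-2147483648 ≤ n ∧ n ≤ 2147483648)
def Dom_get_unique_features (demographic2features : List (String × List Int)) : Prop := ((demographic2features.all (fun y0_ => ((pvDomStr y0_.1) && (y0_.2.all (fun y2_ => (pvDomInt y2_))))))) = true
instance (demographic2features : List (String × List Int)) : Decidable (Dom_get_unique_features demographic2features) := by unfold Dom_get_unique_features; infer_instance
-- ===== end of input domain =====

-- B derives each demographic's unique features from a single per-feature occurrence count instead
-- of A's per-demographic union over all other demographics (objective: faster).

-- ===== PORT A =====
-- other_features: union of the feature lists of all entries whose demo differs from p's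
def pvOtherA (l : List (String × List Int)) (p : String × List Int) : PySem.Set Int :=
  l.foldl (fun (o : PySem.Set Int) (q : String × List Int) =>
    if q.1 ≠ p.1 then PySem.Set.update o q.2 else o) PySem.Set.empty

-- sorted(list(set(target_features) - other_features))
def pvValA (l : List (String × List Int)) (p : String × List Int) : List Int :=
  PySem.List.sorted (PySem.Set.diff (PySem.Set.ofList p.2) (pvOtherA l p)) (fun x => x) false

def get_unique_features (demographic2features : List (String × List Int)) : List (String × List Int) :=
  (demographic2features.foldl
    (fun (acc : PySem.Dict String (List Int)) (p : String × List Int) =>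
      acc.insert p.1 (pvValA demographic2features p))
    PySem.Dict.empty).items

-- ===== PORT B =====
-- count[f] = number of entries whose feature set contains f
def pvCountB (l : List (String × List Int)) : PySem.Dict Int Int :=
  l.foldl (fun (d : PySem.Dict Int Int) (p : String × List Int) =>
      (PySem.Set.ofList p.2).foldl (fun (d : PySem.Dict Int Int) (f : Int) => d.modify f 0 (· + 1)) d)
    PySem.Dict.empty

-- the dict comprehension: its keys are the input keys, distinct under Pre_, in order — so items = map
def get_unique_features_alt (demographic2features : List (String × List Int)) : List (String × List Int) :=
  let count := pvCountB demographic2features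
  demographic2features.map (fun p =>
    (p.1, PySem.List.sorted ((PySem.Set.ofList p.2).filter (fun f => count.getD f 0 == 1)) (fun x => x) false))

-- ===== PRECONDITION & SPEC =====
-- The argument models a Python dict, whose keys are necessarily distinct; association lists with a
-- duplicated demographic name represent no Python input at all and are excluded.
def Pre_get_unique_features (demographic2features : List (String × List Int)) : Prop :=
  (demographic2features.map Prod.fst).Nodup
instance (demographic2features : List (String × List Int)) : Decidable (Pre_get_unique_features demographic2features) := by unfold Pre_get_unique_features; infer_instance

def pvWitness_get_unique_features : (List (String × List Int)) :=
  [("young", [1, 3, 5]), ("old", [2, 3]), ("mid", [])]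

def Spec_get_unique_features (demographic2features : List (String × List Int)) (out : List (String × List Int)) : Prop := out = get_unique_features_alt demographic2features
instance (demographic2features : List (String × List Int)) (out : List (String × List Int)) : Decidable (Spec_get_unique_features demographic2features out) := by unfold Spec_get_unique_features; infer_instance

-- ===== CLAIM (what is proved, stated in full; the proofs are below) =====
def Claim_equal_get_unique_features : Prop := ∀ (demographic2features : List (String × List Int)), Dom_get_unique_features demographic2features → Pre_get_unique_features demographic2features → Spec_get_unique_features demographic2features (get_unique_features demographic2features)

-- ===== LEMMAS AND PROOFS =====

-- membership in A's other_features accumulator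
theorem pv_mem_other_aux (l : List (String × List Int)) (nm : String) (x : Int) :
    ∀ s : PySem.Set Int,
      x ∈ l.foldl (fun (o : PySem.Set Int) (q : String × List Int) =>
        if q.1 ≠ nm then PySem.Set.update o q.2 else o) s ↔
      x ∈ s ∨ ∃ q ∈ l, q.1 ≠ nm ∧ x ∈ q.2 := by
  induction l with
  | nil => simp
  | cons h t ih =>
    intro s
    simp only [List.foldl_cons, ih, List.mem_cons]
    by_cases hh : h.1 ≠ nm
    · simp only [if_pos hh, PySem.Set.mem_update]
      constructor
      · rintro (⟨hs | hm⟩ | ⟨q, hq, h1, h2⟩)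
        · exact Or.inl hs
        · exact Or.inr ⟨h, Or.inl rfl, hh, hm⟩
        · exact Or.inr ⟨q, Or.inr hq, h1, h2⟩
      · rintro (hs | ⟨q, (rfl | hq), h1, h2⟩)
        · exact Or.inl (Or.inl hs)
        · exact Or.inl (Or.inr h2)
        · exact Or.inr ⟨q, hq, h1, h2⟩
    · simp only [if_neg hh]
      constructor
      · rintro (hs | ⟨q, hq, h1, h2⟩)
        · exact Or.inl hs
        · exact Or.inr ⟨q, Or.inr hq, h1, h2⟩
      · rintro (hs | ⟨q, (rfl | hq), h1, h2⟩)
        · exact Or.inl hs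
        · exact absurd h1 hh
        · exact Or.inr ⟨q, hq, h1, h2⟩

theorem pv_mem_otherA (l : List (String × List Int)) (p : String × List Int) (x : Int) :
    x ∈ pvOtherA l p ↔ ∃ q ∈ l, q.1 ≠ p.1 ∧ x ∈ q.2 := by
  unfold pvOtherA
  rw [pv_mem_other_aux]
  simp [PySem.Set.empty]

-- B's counter counts the entries whose feature list contains x
theorem pv_count_getD (l : List (String × List Int)) (x : Int) :
    ∀ d : PySem.Dict Int Int,
      (l.foldl (fun (d : PySem.Dict Int Int) (p : String × List Int) =>
          (PySem.Set.ofList p.2).foldl (fun (d : PySem.Dict Int Int) (f : Int) => d.modify f 0 (· + 1)) d)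
        d).getD x 0 = d.getD x 0 + (l.countP (fun q => decide (x ∈ q.2)) : Int) := by
  induction l with
  | nil => simp
  | cons h t ih =>
    intro d
    simp only [List.foldl_cons, ih, PySem.Dict.getD_foldl_modify_add_one, List.countP_cons]
    have hc : (PySem.Set.ofList h.2).count x = if decide (x ∈ h.2) = true then 1 else 0 := by
      by_cases hm : x ∈ h.2
      · simp [hm]
      · simp [hm, List.count_eq_zero_of_not_mem (fun hc => hm ((PySem.Set.mem_ofList h.2 x).mp hc))]
    rw [hc]
    split_ifs <;> push_cast <;> ring

-- with distinct keys, occurrence count 1 means: only p's own entry contains x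
theorem pv_countP_eq_one (l : List (String × List Int)) (p : String × List Int) (x : Int)
    (hnd : (l.map Prod.fst).Nodup) (hp : p ∈ l) (hx : x ∈ p.2) :
    l.countP (fun q => decide (x ∈ q.2)) = 1 ↔ ∀ q ∈ l, x ∈ q.2 → q.1 = p.1 := by
  have hlnd : l.Nodup := hnd.of_map
  have hperm : l.Perm (p :: l.erase p) := List.perm_cons_erase hp
  have hpe : p ∉ l.erase p := hlnd.not_mem_erase
  have hcp : l.countP (fun q => decide (x ∈ q.2)) =
      1 + (l.erase p).countP (fun q => decide (x ∈ q.2)) := by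
    rw [hperm.countP_eq, List.countP_cons]
    simp [hx, Nat.add_comm]
  constructor
  · intro h1 q hq hxq
    by_contra hne
    have hqp : q ≠ p := fun h => hne (h ▸ rfl)
    have hqe : q ∈ l.erase p := (List.mem_erase_of_ne hqp).mpr hq
    have : 1 ≤ (l.erase p).countP (fun q => decide (x ∈ q.2)) :=
      List.countP_pos_iff.mpr ⟨q, hqe, by simpa using hxq⟩
    omega
  · intro hall
    have h0 : (l.erase p).countP (fun q => decide (x ∈ q.2)) = 0 := by
      rw [List.countP_eq_zero]
      intro q hq
      have hql : q ∈ l := List.mem_of_mem_erase hq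
      simp only [decide_eq_true_eq]
      intro hxq
      have := hall q hql hxq
      have hqp : q = p := List.inj_on_of_nodup_map hnd hql hp this
      exact hpe (hqp ▸ hq)
    omega

-- pointwise: A's value at an entry equals B's value there
theorem pv_val_eq (l : List (String × List Int)) (p : String × List Int)
    (hnd : (l.map Prod.fst).Nodup) (hp : p ∈ l) :
    pvValA l p =
      PySem.List.sorted ((PySem.Set.ofList p.2).filter (fun f => (pvCountB l).getD f 0 == 1)) (fun x => x) false := by
  unfold pvValA
  apply PySem.List.sorted_eq_sorted_of_perm _ _ _ (fun a b h => h)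
  apply (List.perm_ext_iff_of_nodup (PySem.Set.nodup_diff _ _ (PySem.Set.nodup_ofList p.2))
    ((PySem.Set.nodup_ofList p.2).filter _)).mpr
  intro x
  rw [PySem.Set.mem_diff, List.mem_filter, PySem.Set.mem_ofList, pv_mem_otherA, beq_iff_eq]
  unfold pvCountB
  rw [pv_count_getD]
  constructor
  · rintro ⟨hx, hno⟩
    refine ⟨hx, ?_⟩
    have : l.countP (fun q => decide (x ∈ q.2)) = 1 := by
      rw [pv_countP_eq_one l p x hnd hp hx]
      intro q hq hxq
      by_contra hne
      exact hno ⟨q, hq, hne, hxq⟩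
    simp [this]
  · rintro ⟨hx', hc⟩
    have hx : x ∈ p.2 := hx'
    refine ⟨hx, ?_⟩
    have h1 : l.countP (fun q => decide (x ∈ q.2)) = 1 := by
      simp only [PySem.Dict.getD_empty] at hc
      exact_mod_cast by linarith [hc] 
    rw [pv_countP_eq_one l p x hnd hp hx] at h1
    rintro ⟨q, hq, hne, hxq⟩
    exact hne (h1 q hq hxq)

-- ===== VERDICT (by name: the statement is the Claim_ definition above) =====
theorem get_unique_features_spec : Claim_equal_get_unique_features := by
  intro l _ hpre
  unfold Spec_get_unique_features get_unique_features get_unique_features_alt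
  rw [PySem.Dict.items_foldl_insert_fresh l Prod.fst (fun p => pvValA l p) PySem.Dict.empty
    (fun a _ => PySem.Dict.contains_empty a.1) hpre]
  simp only [PySem.Dict.empty, List.nil_append]
  exact List.map_congr_left (fun p hp => by rw [pv_val_eq l p hpre hp])
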